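-- pv_equiv track=rewrite | github.com/Matsjohaa/ACIT4630-exam | analysis/eval_retrieval.py | _contains_target
-- ===== SOURCE A (Python) =====
-- from typing import Any, Iterable
--
-- def _normalize_section_id(value: str) -> str:
--     normalized = str(value or "").strip().lower()
--     normalized = normalized.replace("§", "")
--     normalized = " ".join(normalized.split())
--     return normalized
--
-- def _contains_target(
--     retrieved_sections: Iterable[str],
--     target_sections: Iterable[str],
-- ) -> bool:
--     retrieved_set = {
--         _normalize_section_id(section)
--         for section in retrieved_sections
--         if str(section).strip()
--     }
--     target_set = {
--         _normalize_section_id(section)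
--         for section in target_sections
--         if str(section).strip()
--     }
--
--     if not target_set:
--         return False
--
--     return not retrieved_set.isdisjoint(target_set)
-- ===== SOURCE B (Python) =====
-- def _normalize_section_id(value: str) -> str:
--     normalized = str(value or "").strip().lower()
--     normalized = normalized.replace("§", "")
--     normalized = " ".join(normalized.split())
--     return normalized
--
--
-- def _contains_target(retrieved_sections, target_sections):
--     # Sort-based intersection test: sort both normalized lists and run a
--     # two-pointer merge looking for a common element (no hash sets).
--     r = sorted(_normalize_section_id(s) for s in retrieved_sections if str(s).strip())
--     t = sorted(_normalize_section_id(s) for s in target_sections if str(s).strip())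
--     i = j = 0
--     while i < len(r) and j < len(t):
--         if r[i] == t[j]:
--             return True
--         if r[i] < t[j]:
--             i += 1
--         else:
--             j += 1
--     return False
-- ===== Notes on version B (the rewrite author's own statement) =====
-- stated objective: alternative
-- what changed: B replaces A's two hash-set comprehensions plus isdisjoint with sorting both normalized lists and a two-pointer merge that detects a common element; the empty-target guard disappears because the merge is vacuously False then.
import Mathlib
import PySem

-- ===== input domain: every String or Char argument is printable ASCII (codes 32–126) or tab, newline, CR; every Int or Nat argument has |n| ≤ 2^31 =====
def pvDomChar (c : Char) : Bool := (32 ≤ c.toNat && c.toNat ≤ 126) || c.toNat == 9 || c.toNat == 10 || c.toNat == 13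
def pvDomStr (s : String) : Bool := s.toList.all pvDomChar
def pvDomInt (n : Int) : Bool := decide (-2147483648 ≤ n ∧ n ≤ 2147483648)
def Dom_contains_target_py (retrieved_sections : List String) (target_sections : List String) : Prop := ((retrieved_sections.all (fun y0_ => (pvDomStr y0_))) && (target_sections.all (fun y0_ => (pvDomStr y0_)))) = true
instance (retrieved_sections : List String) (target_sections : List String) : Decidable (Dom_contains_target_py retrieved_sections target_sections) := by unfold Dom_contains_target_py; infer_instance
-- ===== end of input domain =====

-- B replaces A's two hash sets + isdisjoint with sorting both normalized lists and a
-- two-pointer merge intersection test (objective: alternative algorithm, same result).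
-- ===== PORT A =====
-- shared helper: Python _normalize_section_id ('value or ""' is value itself for strings)
def pvNorm (value : String) : String :=
  let normalized := PySem.Str.lower (PySem.Str.strip value)
  let normalized := PySem.Str.replace normalized "§" ""
  PySem.Str.join " " (PySem.Str.split₀ normalized)

-- shared helper: the normalized comprehension body '[_norm(s) for s in l if str(s).strip()]'
def pvNormList (l : List String) : List String :=
  (l.filter (fun s => PySem.Str.strip s != "")).map pvNorm

def contains_target_py (retrieved_sections : List String) (target_sections : List String) : Bool :=
  let retrievedSet : PySem.Set String := PySem.Set.ofList (pvNormList retrieved_sections)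
  let targetSet : PySem.Set String := PySem.Set.ofList (pvNormList target_sections)
  if targetSet.isEmpty then false
  else !(PySem.Set.isdisjoint retrievedSet targetSet)

-- ===== PORT B =====
-- the two-pointer merge over two sorted lists, looking for a common element
def pvMergeScan : List String → List String → Bool
  | [], _ => false
  | _ :: _, [] => false
  | a :: as, b :: bs =>
    if a == b then true
    else if a < b then pvMergeScan as (b :: bs)
    else pvMergeScan (a :: as) bs
termination_by xs ys => xs.length + ys.length

def contains_target_py_alt (retrieved_sections : List String) (target_sections : List String) : Bool :=
  let rs := PySem.List.sorted (pvNormList retrieved_sections) (fun x => x) false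
  let ts := PySem.List.sorted (pvNormList target_sections) (fun x => x) false
  pvMergeScan rs ts

-- ===== PRECONDITION & SPEC =====
def Spec_contains_target_py (retrieved_sections : List String) (target_sections : List String) (out : Bool) : Prop := out = contains_target_py_alt retrieved_sections target_sections
instance (retrieved_sections : List String) (target_sections : List String) (out : Bool) : Decidable (Spec_contains_target_py retrieved_sections target_sections out) := by unfold Spec_contains_target_py; infer_instance

-- ===== CLAIM (what is proved, stated in full; the proofs are below) =====
def Claim_equal_contains_target_py : Prop := ∀ (retrieved_sections : List String) (target_sections : List String), Dom_contains_target_py retrieved_sections target_sections → Spec_contains_target_py retrieved_sections target_sections (contains_target_py retrieved_sections target_sections)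

-- ===== LEMMAS AND PROOFS =====

-- if the merge reports true there is a common element (no sortedness needed)
theorem pvMergeScan_sound : ∀ xs ys : List String, pvMergeScan xs ys = true → ∃ x, x ∈ xs ∧ x ∈ ys := by
  intro xs ys h
  induction xs, ys using pvMergeScan.induct with
  | case1 ys => exact absurd h (by simp [pvMergeScan])
  | case2 a as => exact absurd h (by simp [pvMergeScan])
  | case3 a as b bs heq =>
    exact ⟨a, List.mem_cons_self, by
      have : a = b := by simpa using heq
      simp [this]⟩
  | case4 a as b bs heq hlt ih =>
    rw [pvMergeScan, if_neg (by simp_all), if_pos hlt] at h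
    obtain ⟨x, hx, hy⟩ := ih h
    exact ⟨x, List.mem_cons_of_mem _ hx, hy⟩
  | case5 a as b bs heq hlt ih =>
    rw [pvMergeScan, if_neg (by simp_all), if_neg hlt] at h
    obtain ⟨x, hx, hy⟩ := ih h
    exact ⟨x, hx, List.mem_cons_of_mem _ hy⟩

-- on two ≤-sorted lists with a common element the merge reports true
theorem pvMergeScan_complete (x : String) : ∀ xs ys : List String,
    xs.Pairwise (· ≤ ·) → ys.Pairwise (· ≤ ·) → x ∈ xs → x ∈ ys → pvMergeScan xs ys = true := by
  intro xs ys hxs hys hx hy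
  induction xs, ys using pvMergeScan.induct with
  | case1 ys => exact absurd hx (by simp)
  | case2 a as => exact absurd hy (by simp)
  | case3 a as b bs heq => simp [pvMergeScan, heq]
  | case4 a as b bs heq hlt ih =>
    rw [pvMergeScan, if_neg (by simp_all), if_pos hlt]
    have hne : a ≠ b := by simpa using heq
    have hble : b ≤ x := by
      rcases List.mem_cons.mp hy with rfl | hmem
      · exact le_refl _
      · exact (List.pairwise_cons.mp hys).1 x hmem
    have hxa : x ≠ a := fun h => absurd (lt_of_lt_of_le hlt hble) (by simp [h])
    have hx' : x ∈ as := by rcases List.mem_cons.mp hx with rfl | hmem; exact absurd rfl hxa; exact hmem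
    exact ih (List.pairwise_cons.mp hxs).2 hys hx' hy
  | case5 a as b bs heq hlt ih =>
    rw [pvMergeScan, if_neg (by simp_all), if_neg hlt]
    have hne : a ≠ b := by simpa using heq
    have hba : b < a := lt_of_le_of_ne (not_lt.mp hlt) (Ne.symm hne)
    have hale : a ≤ x := by
      rcases List.mem_cons.mp hx with rfl | hmem
      · exact le_refl _
      · exact (List.pairwise_cons.mp hxs).1 x hmem
    have hxb : x ≠ b := fun h => absurd (lt_of_lt_of_le hba hale) (by simp [h])
    have hy' : x ∈ bs := by rcases List.mem_cons.mp hy with rfl | hmem; exact absurd rfl hxb; exact hmem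
    exact ih hxs (List.pairwise_cons.mp hys).2 hx hy'

-- characterisation of B
theorem pvAlt_iff (r t : List String) :
    contains_target_py_alt r t = true ↔ ∃ x, x ∈ pvNormList r ∧ x ∈ pvNormList t := by
  unfold contains_target_py_alt
  constructor
  · intro h
    obtain ⟨x, hx, hy⟩ := pvMergeScan_sound _ _ h
    exact ⟨x, (PySem.List.mem_sorted _ _ _ _).mp hx, (PySem.List.mem_sorted _ _ _ _).mp hy⟩
  · rintro ⟨x, hx, hy⟩
    exact pvMergeScan_complete x _ _
      (PySem.List.sorted_pairwise _ _) (PySem.List.sorted_pairwise _ _)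
      ((PySem.List.mem_sorted _ _ _ _).mpr hx) ((PySem.List.mem_sorted _ _ _ _).mpr hy)

-- characterisation of A
theorem pvA_iff (r t : List String) :
    contains_target_py r t = true ↔ ∃ x, x ∈ pvNormList r ∧ x ∈ pvNormList t := by
  unfold contains_target_py
  by_cases he : (PySem.Set.ofList (pvNormList t)).isEmpty
  · simp only [he, if_true]
    constructor
    · intro h; exact absurd h (by simp)
    · rintro ⟨x, _, hy⟩
      have : x ∈ PySem.Set.ofList (pvNormList t) := (PySem.Set.mem_ofList _ _).mpr hy
      rw [List.isEmpty_iff] at he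
      rw [he] at this
      exact absurd this (by simp)
  · rw [if_neg he]
    simp only [Bool.not_eq_true']
    constructor
    · intro h
      by_contra hnone
      push Not at hnone
      apply absurd h
      simp only [Bool.not_eq_false]
      rw [PySem.Set.isdisjoint_iff]
      intro x hx hy
      exact hnone x ((PySem.Set.mem_ofList _ _).mp hx) ((PySem.Set.mem_ofList _ _).mp hy)
    · rintro ⟨x, hx, hy⟩
      rw [Bool.eq_false_iff]
      intro hd
      rw [PySem.Set.isdisjoint_iff] at hd
      exact hd x ((PySem.Set.mem_ofList _ _).mpr hx) ((PySem.Set.mem_ofList _ _).mpr hy)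

-- ===== VERDICT (by name: the statement is the Claim_ definition above) =====
theorem contains_target_py_spec : Claim_equal_contains_target_py := by
  intro r t _
  unfold Spec_contains_target_py
  rw [Bool.eq_iff_iff, pvA_iff, pvAlt_iff]
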